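-- pv_equiv track=rewrite | github.com/reactVishnu/coding_intv_python | zero_movement.py | zero_movement
-- ===== SOURCE A (Python) =====
-- def zero_movement(x):
--     n = []
--     for i in x:
--         if i == 0:
--             n.insert(0, 0)
--         else:
--             n.append(i)
--     return n
-- ===== SOURCE B (Python) =====
-- def zero_movement(x):
--     return [0] * x.count(0) + [i for i in x if i != 0]
-- ===== Notes on version B (the rewrite author's own statement) =====
-- stated objective: simpler
-- what changed: Replaces the loop with conditional front-insertion by a one-line closed form: count the zeros once and prepend that many zeros to the non-zeros collected by a filter.
import Mathlib
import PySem

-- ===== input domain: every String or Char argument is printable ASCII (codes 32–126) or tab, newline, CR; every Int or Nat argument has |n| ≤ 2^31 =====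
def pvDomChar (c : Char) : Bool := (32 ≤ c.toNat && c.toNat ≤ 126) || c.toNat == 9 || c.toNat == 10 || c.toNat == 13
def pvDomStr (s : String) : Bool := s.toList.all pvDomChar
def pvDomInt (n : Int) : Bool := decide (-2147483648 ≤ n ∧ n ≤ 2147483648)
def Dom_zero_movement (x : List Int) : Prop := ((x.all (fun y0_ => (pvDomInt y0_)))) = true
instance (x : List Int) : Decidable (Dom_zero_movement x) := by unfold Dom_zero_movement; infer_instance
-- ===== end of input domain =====

-- B replaces the loop with front-insertion by a one-liner: prepend count(0) zeros to the non-zeros kept by a filter (simpler; timing run found no measurable speed difference on its inputs).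


-- ===== PORT A =====
-- for i in x: if i == 0 then n.insert(0, 0) else n.append(i)
def zero_movement (x : List Int) : List Int :=
  x.foldl (fun n i => if i == 0 then PySem.List.insert n 0 0 else n ++ [i]) []

-- ===== PORT B =====
-- [0] * x.count(0) + [i for i in x if i != 0]
def zero_movement_alt (x : List Int) : List Int :=
  List.replicate (PySem.List.count x 0) 0 ++ x.filter (fun i => i != 0)

-- ===== PRECONDITION & SPEC =====
def Spec_zero_movement (x : List Int) (out : List Int) : Prop := out = zero_movement_alt x
instance (x : List Int) (out : List Int) : Decidable (Spec_zero_movement x out) := by unfold Spec_zero_movement; infer_instance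

-- ===== CLAIM (what is proved, stated in full; the proofs are below) =====
def Claim_equal_zero_movement : Prop := ∀ (x : List Int), Dom_zero_movement x → Spec_zero_movement x (zero_movement x)

-- ===== LEMMAS AND PROOFS =====

lemma zm_loop (x : List Int) (z : ℕ) (nz : List Int) :
    x.foldl (fun n i => if i == 0 then PySem.List.insert n 0 0 else n ++ [i])
      (List.replicate z (0 : Int) ++ nz) =
      List.replicate (z + PySem.List.count x 0) (0 : Int) ++
        (nz ++ x.filter (fun i => i != 0)) := by
  induction x generalizing z nz with
  | nil => simp [PySem.List.count]
  | cons a t ih =>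
    by_cases ha : a = 0
    · subst ha
      have h0 : PySem.List.insert (List.replicate z (0 : Int) ++ nz) 0 0 =
          List.replicate (z + 1) (0 : Int) ++ nz := by
        rw [PySem.List.insert_zero]; simp [List.replicate_succ]
      rw [List.foldl_cons, if_pos (by simp), h0, ih]
      simp only [PySem.List.count, List.filter_cons, List.count_cons]
      simp
      omega
    · have hb : (a == 0) = false := by simp [ha]
      have hs : (List.replicate z (0 : Int) ++ nz) ++ [a] =
          List.replicate z (0 : Int) ++ (nz ++ [a]) := by simp
      rw [List.foldl_cons, if_neg (by simp [ha]), hs, ih]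
      simp [PySem.List.count, ha]

-- ===== VERDICT (by name: the statement is the Claim_ definition above) =====
theorem zero_movement_spec : Claim_equal_zero_movement := by
  intro x _
  show zero_movement x = zero_movement_alt x
  have := zm_loop x 0 []
  simpa [zero_movement, zero_movement_alt] using this
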